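-- pv_equiv track=rewrite | github.com/woshishiq1/hipy-drpy | tvbox/py/get_iptv.py | match_channels
-- ===== SOURCE A (Python) =====
-- from collections import OrderedDict
--
-- def match_channels(template_channels, all_channels):
--     """
--     匹配频道逻辑优化版
--     """
--     matched = OrderedDict()
--     unmatched_template = OrderedDict()
--
--     # 1. 数据扁平化预处理：将所有源频道放入一个大列表中，避免多层循环
--     # 结构: (normalized_name, original_name, url, category)
--     # 这里的 normalized_name 用于不区分大小写的比对
--     flattened_source_channels = []
--     for cat, chans in all_channels.items():
--         for name, url in chans:
--             flattened_source_channels.append({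
--                 'norm_name': name.lower(),
--                 'name': name,
--                 'url': url,
--                 'cat': cat,
--                 'key': f"{name}_{url}" # 用于去重的唯一键
--             })
--
--     used_channel_keys = set()
--
--     # 初始化输出结构
--     for cat in template_channels:
--         matched[cat] = OrderedDict()
--         unmatched_template[cat] = []
--
--     # 2. 匹配逻辑
--     for category, tmpl_names in template_channels.items():
--         for tmpl_name in tmpl_names:
--             # 解析变体: "CCTV1|CCTV-1" -> ["CCTV1", "CCTV-1"]
--             variants = [n.strip() for n in tmpl_name.split("|") if n.strip()]
--
--             found_for_this_template = False
--
--             # 对每个变体进行匹配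
--             for variant in variants:
--                 variant_lower = variant.lower()
--
--                 # 在扁平化的源列表中搜索
--                 # 优化点：不再使用正则，而是使用字符串包含 (in) 或 精确匹配
--                 # 如果需要精确匹配优先，可以分两轮；这里保留原逻辑的"包含即匹配"
--
--                 for src in flattened_source_channels:
--                     # 检查是否已使用
--                     if src['key'] in used_channel_keys:
--                         continue
--
--                     # 核心匹配逻辑：源频道名称 包含 模板变体
--                     # 例如：模板 "CCTV-1" 匹配源 "CCTV-1 FHD"
--                     if variant_lower in src['norm_name']:
--                         if src['name'] not in matched[category]:
--                             matched[category][src['name']] = []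
--
--                         matched[category][src['name']].append((src['name'], src['url']))
--                         used_channel_keys.add(src['key'])
--                         found_for_this_template = True
--
--                         # 注意：原代码逻辑没有 break，允许一个变体匹配多个源频道（多线路）
--
--             if not found_for_this_template:
--                 unmatched_template[category].append(tmpl_name)
--
--     # 3. 找出源中完全未被使用的频道
--     unmatched_source = OrderedDict()
--     for src in flattened_source_channels:
--         if src['key'] not in used_channel_keys:
--             if src['cat'] not in unmatched_source:
--                 unmatched_source[src['cat']] = []
--             unmatched_source[src['cat']].append((src['name'], src['url']))
--
--     return matched, unmatched_template, unmatched_source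
-- ===== SOURCE B (Python) =====
-- def match_channels(template_channels, all_channels):
--     """Source-major re-implementation: flatten sources once, compute each source's
--     first matching pattern (early break), keep per-dedup-key the best (smallest)
--     pattern, then reassemble the outputs in template-priority order."""
--     # flatten sources: (cat, name, url, norm, key)
--     flat = []
--     for cat, chans in all_channels.items():
--         for name, url in chans:
--             flat.append((cat, name, url, name.lower(), f"{name}_{url}"))
--
--     # compile variant patterns in priority order; remember each template's range
--     pats = []
--     tmpl_index = []  # (cat, tmpl_name, start, stop)
--     for cat, tmpl_names in template_channels.items():
--         for tmpl_name in tmpl_names: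
--             start = len(pats)
--             for part in tmpl_name.split("|"):
--                 v = part.strip()
--                 if v:
--                     pats.append(v.lower())
--             tmpl_index.append((cat, tmpl_name, start, len(pats)))
--
--     # first matching pattern per source (stop at the first hit)
--     def first_match(norm):
--         for i, v in enumerate(pats):
--             if v in norm:
--                 return i
--         return None
--
--     fm = [first_match(s[3]) for s in flat]
--
--     # per dedup-key: the smallest pattern index any occurrence reaches
--     best = {}
--     for s, f in zip(flat, fm):
--         if f is not None:
--             b = best.get(s[4])
--             if b is None or f < b:
--                 best[s[4]] = f
--
--     # bucket per pattern the winning occurrence of each key (first one attaining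
--     # the key's best pattern), in source order
--     buckets = {}
--     seen = set()
--     for s, f in zip(flat, fm):
--         if f is not None and best.get(s[4]) == f and s[4] not in seen:
--             seen.add(s[4])
--             buckets.setdefault(f, []).append(s)
--
--     # reassemble outputs in template order
--     matched = {cat: {} for cat in template_channels}
--     unmatched_template = {cat: [] for cat in template_channels}
--     for cat, tmpl_name, start, stop in tmpl_index:
--         hit = False
--         for p in range(start, stop):
--             for (_scat, name, url, _norm, _key) in buckets.get(p, []):
--                 matched[cat].setdefault(name, []).append((name, url))
--                 hit = True
--         if not hit:
--             unmatched_template[cat].append(tmpl_name)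
--
--     unmatched_source = {}
--     for (cat, name, url, _norm, key) in flat:
--         if key not in best:
--             unmatched_source.setdefault(cat, []).append((name, url))
--
--     return matched, unmatched_template, unmatched_source
-- ===== Notes on version B (the rewrite author's own statement) =====
-- stated objective: faster
-- what changed: A is pattern-major: for every template variant it rescans the whole flattened source list while threading a used-key set; B is source-major: it compiles the variant patterns once, computes for each source its first matching pattern with an early break, picks per dedup-key the occurrence with the smallest (pattern, position), buckets the winners per pattern, and reassembles the three outputs in template-priority order without ever rescanning the sources.
import Mathlib
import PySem

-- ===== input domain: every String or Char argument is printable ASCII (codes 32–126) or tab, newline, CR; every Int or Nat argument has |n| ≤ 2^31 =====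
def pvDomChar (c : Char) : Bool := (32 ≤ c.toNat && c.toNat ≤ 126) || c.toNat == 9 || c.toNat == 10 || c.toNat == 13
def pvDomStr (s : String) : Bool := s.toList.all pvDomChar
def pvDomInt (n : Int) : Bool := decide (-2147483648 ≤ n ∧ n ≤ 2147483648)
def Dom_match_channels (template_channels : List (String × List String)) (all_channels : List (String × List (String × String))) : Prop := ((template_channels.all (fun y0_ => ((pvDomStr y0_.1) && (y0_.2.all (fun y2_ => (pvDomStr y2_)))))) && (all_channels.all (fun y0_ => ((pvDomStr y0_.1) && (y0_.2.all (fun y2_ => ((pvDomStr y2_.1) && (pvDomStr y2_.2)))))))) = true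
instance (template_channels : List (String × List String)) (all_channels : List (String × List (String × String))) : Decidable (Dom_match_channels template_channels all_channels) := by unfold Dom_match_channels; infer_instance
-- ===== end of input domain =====

-- B re-implements A source-major (first-matching-pattern per source with early break,
-- per-dedup-key winners, per-pattern buckets) instead of A's pattern-major rescan of all
-- sources per template variant; measured faster by a constant factor on the timing inputs.

-- ===== PORT A =====
-- record for one flattened source channel (Python: the dict with keys norm_name/name/url/cat/key)
structure Src where
  cat : String
  name : String
  url : String
  norm : String
  key : String
deriving DecidableEq, Repr

-- shared flattening loop (both Pythons build the same flattened source list)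
def flatten (all_channels : List (String × List (String × String))) : List Src :=
  all_channels.foldl (fun fl c =>
    c.2.foldl (fun fl2 nu =>
      fl2 ++ [⟨c.1, nu.1, nu.2, PySem.Str.lower nu.1, nu.1 ++ "_" ++ nu.2⟩]) fl) []

-- A's innermost loop body: one source channel against one (lowered) template variant
def srcStepA (cat : String) (vl : String)
    (acc : (PySem.Dict String (PySem.Dict String (List (String × String))) × PySem.Set String) × Bool)
    (src : Src) :
    (PySem.Dict String (PySem.Dict String (List (String × String))) × PySem.Set String) × Bool :=
  if acc.1.2.contains src.key then acc
  else if PySem.Str.isIn vl src.norm then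
    ((acc.1.1.modify cat PySem.Dict.empty (fun md =>
        (if md.get? src.name = none then md.insert src.name ([] : List (String × String)) else md).modify
          src.name [] (fun l => l ++ [(src.name, src.url)])),
      acc.1.2.add src.key), true)
  else acc

-- A's per-template-name processing: split into variants, scan all sources per variant
def tmplStepA (flat : List Src) (cat : String)
    (st : PySem.Dict String (PySem.Dict String (List (String × String))) × PySem.Dict String (List String) × PySem.Set String)
    (tmpl : String) :
    PySem.Dict String (PySem.Dict String (List (String × String))) × PySem.Dict String (List String) × PySem.Set String :=
  let variants := (((PySem.Str.split? tmpl "|").getD []).filter (fun n => PySem.Str.strip n ≠ "")).map PySem.Str.strip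
  let r := variants.foldl (fun acc variant => flat.foldl (srcStepA cat (PySem.Str.lower variant)) acc)
      ((st.1, st.2.2), false)
  (r.1.1, (if r.2 then st.2.1 else st.2.1.modify cat [] (fun l => l ++ [tmpl])), r.1.2)

-- A's final loop: source channels whose dedup key was never used
def usStepA (used : PySem.Set String) (d : PySem.Dict String (List (String × String))) (src : Src) :
    PySem.Dict String (List (String × String)) :=
  if used.contains src.key then d
  else (if d.get? src.cat = none then d.insert src.cat ([] : List (String × String)) else d).modify
    src.cat [] (fun l => l ++ [(src.name, src.url)])

def match_channels (template_channels : List (String × List String)) (all_channels : List (String × List (String × String))) : (List (String × List (String × List (String × String)))) × (List (String × List String)) × (List (String × List (String × String))) :=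
  let flat := flatten all_channels
  let fin := template_channels.foldl (fun st c => c.2.foldl (tmplStepA flat c.1) st)
    (template_channels.foldl (fun m c => m.insert c.1 PySem.Dict.empty) PySem.Dict.empty,
     template_channels.foldl (fun m c => m.insert c.1 ([] : List String)) PySem.Dict.empty,
     ([] : PySem.Set String))
  let us := flat.foldl (usStepA fin.2.2) PySem.Dict.empty
  (fin.1.items.map (fun p => (p.1, p.2.items)), fin.2.1.items, us.items)

-- ===== PORT B =====
-- Source B's first_match: index of the first pattern contained in this source name
def firstMatchB : List String → String → Int → Option Int
  | [], _, _ => none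
  | v :: vs, norm, i => if PySem.Str.isIn v norm then some i else firstMatchB vs norm (i + 1)

-- Source B's best-pattern loop body (running per-key minimum of first-match indices)
def bestStepB (d : PySem.Dict String Int) (sf : Src × Option Int) : PySem.Dict String Int :=
  match sf.2 with
  | none => d
  | some f =>
    match d.get? sf.1.key with
    | none => d.insert sf.1.key f
    | some b => if f < b then d.insert sf.1.key f else d

-- Source B's bucket loop body: the first occurrence attaining its key's best pattern wins
def bkStepB (best : PySem.Dict String Int)
    (acc : PySem.Dict Int (List Src) × PySem.Set String) (sf : Src × Option Int) :
    PySem.Dict Int (List Src) × PySem.Set String :=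
  match sf.2 with
  | none => acc
  | some f =>
    if best.get? sf.1.key == some f && !acc.2.contains sf.1.key then
      (acc.1.modify f [] (fun l => l ++ [sf.1]), acc.2.add sf.1.key)
    else acc

-- Source B's reassembly loop body: one template (cat, name, pattern range) against the buckets
def tmplStepB (buckets : PySem.Dict Int (List Src))
    (acc : PySem.Dict String (PySem.Dict String (List (String × String))) × PySem.Dict String (List String))
    (t : String × String × Int × Int) :
    PySem.Dict String (PySem.Dict String (List (String × String))) × PySem.Dict String (List String) :=
  let r := (PySem.List.pyRange t.2.2.1 t.2.2.2 1).foldl (fun acc2 p =>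
      (buckets.getD p []).foldl (fun acc3 s =>
        (acc3.1.modify t.1 PySem.Dict.empty (fun md => md.modify s.name [] (fun l => l ++ [(s.name, s.url)])), true))
        acc2)
    (acc.1, false)
  (r.1, if r.2 then acc.2 else acc.2.modify t.1 [] (fun l => l ++ [t.2.1]))

def match_channels_alt (template_channels : List (String × List String)) (all_channels : List (String × List (String × String))) : (List (String × List (String × List (String × String)))) × (List (String × List String)) × (List (String × List (String × String))) :=
  let flat := flatten all_channels
  let pt := template_channels.foldl (fun pt c =>
      c.2.foldl (fun (pt : List String × List (String × String × Int × Int)) tmpl =>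
        let start : Int := pt.1.length
        let pats := ((PySem.Str.split? tmpl "|").getD []).foldl (fun ps part =>
            if PySem.Str.strip part ≠ "" then ps ++ [PySem.Str.lower (PySem.Str.strip part)] else ps) pt.1
        (pats, pt.2 ++ [(c.1, tmpl, start, (pats.length : Int))])) pt)
    (([], []) : List String × List (String × String × Int × Int))
  let fm := flat.map (fun s => firstMatchB pt.1 s.norm 0)
  let best := (flat.zip fm).foldl bestStepB PySem.Dict.empty
  let bk := (flat.zip fm).foldl (bkStepB best) (PySem.Dict.empty, ([] : PySem.Set String))
  let mu := pt.2.foldl (tmplStepB bk.1)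
    (template_channels.foldl (fun m c => m.insert c.1 PySem.Dict.empty) PySem.Dict.empty,
     template_channels.foldl (fun m c => m.insert c.1 ([] : List String)) PySem.Dict.empty)
  let us := flat.foldl (fun (d : PySem.Dict String (List (String × String))) s =>
      if best.get? s.key = none then d.modify s.cat [] (fun l => l ++ [(s.name, s.url)]) else d)
    PySem.Dict.empty
  (mu.1.items.map (fun p => (p.1, p.2.items)), mu.2.items, us.items)

-- ===== PRECONDITION & SPEC =====
def Spec_match_channels (template_channels : List (String × List String)) (all_channels : List (String × List (String × String))) (out : (List (String × List (String × List (String × String)))) × (List (String × List String)) × (List (String × List (String × String)))) : Prop := out = match_channels_alt template_channels all_channels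
instance (template_channels : List (String × List String)) (all_channels : List (String × List (String × String))) (out : (List (String × List (String × List (String × String)))) × (List (String × List String)) × (List (String × List (String × String)))) : Decidable (Spec_match_channels template_channels all_channels out) := by
  unfold Spec_match_channels
  letI h1 : DecidableEq (String × List (String × List (String × String))) := by infer_instance
  letI h2 : DecidableEq (List (String × List (String × List (String × String)))) := fun a b => @List.hasDecEq _ h1 a b
  infer_instance

-- ===== CLAIM (what is proved, stated in full; the proofs are below) =====
def Claim_equal_match_channels : Prop := ∀ (template_channels : List (String × List String)) (all_channels : List (String × List (String × String))), Dom_match_channels template_channels all_channels → Spec_match_channels template_channels all_channels (match_channels template_channels all_channels)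

-- ===== LEMMAS AND PROOFS =====

-- type abbreviations used only by the proofs
abbrev MD := PySem.Dict String (PySem.Dict String (List (String × String)))
abbrev UD := PySem.Dict String (List String)
abbrev SD := PySem.Dict String (List (String × String))

-- canonical (proof-side) descriptions of the data both programs traverse
def varsOf (tmpl : String) : List String :=
  (((PySem.Str.split? tmpl "|").getD []).filter (fun n => PySem.Str.strip n ≠ "")).map
    (fun n => PySem.Str.lower (PySem.Str.strip n))

def tlistOf (tcs : List (String × List String)) : List (String × String) :=
  tcs.flatMap (fun c => c.2.map (fun t => (c.1, t)))

def patsOf (tcs : List (String × List String)) : List String :=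
  (tlistOf tcs).flatMap (fun ct => varsOf ct.2)

def flatOf (acs : List (String × List (String × String))) : List Src :=
  acs.flatMap (fun c => c.2.map (fun nu => ⟨c.1, nu.1, nu.2, PySem.Str.lower nu.1, nu.1 ++ "_" ++ nu.2⟩))

def fmOf (pats : List String) (norm : String) : Option Nat :=
  pats.findIdx? (fun v => PySem.Str.isIn v norm)

def minLtB (flat : List Src) (pats : List String) (i : Nat) (k : String) : Bool :=
  flat.any (fun s => s.key == k && (match fmOf pats s.norm with
    | some m => decide (m < i)
    | none => false))

def eqWB (flat : List Src) (pats : List String) (i : Nat) (k : String) : Bool :=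
  flat.any (fun s => s.key == k && (fmOf pats s.norm == some i))

def isWinB (flat : List Src) (pats : List String) (s : Src) : Bool :=
  match fmOf pats s.norm with
  | some m => !minLtB flat pats m s.key
  | none => false

def winAux (flat : List Src) (pats : List String) : List Src → PySem.Set String → List Src × PySem.Set String
  | [], seen => ([], seen)
  | s :: t, seen =>
    if isWinB flat pats s && !seen.contains s.key then
      let r := winAux flat pats t (seen.add s.key)
      (s :: r.1, r.2)
    else winAux flat pats t seen

def winnersOf (flat : List Src) (pats : List String) : List Src := (winAux flat pats flat []).1

def emitC (cat : String) (m : MD) (s : Src) : MD :=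
  m.modify cat PySem.Dict.empty (fun md => md.modify s.name [] (fun l => l ++ [(s.name, s.url)]))

def evSeg (W : List Src) (pats : List String) : Nat → Nat → List Src
  | _, 0 => []
  | a, n+1 => W.filter (fun s => fmOf pats s.norm == some a) ++ evSeg W pats (a+1) n

def cfold (W : List Src) (pats : List String) : List (String × String) → Nat → (MD × UD) → (MD × UD)
  | [], _, mu => mu
  | ct :: t, a, mu =>
    let n := (varsOf ct.2).length
    let ev := evSeg W pats a n
    cfold W pats t (a + n)
      (ev.foldl (emitC ct.1) mu.1, if ev.isEmpty then mu.2.modify ct.1 [] (fun l => l ++ [ct.2]) else mu.2)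

def tIdx : List (String × String) → Nat → List (String × String × Int × Int)
  | [], _ => []
  | ct :: t, a => (ct.1, ct.2, (a : Int), ((a + (varsOf ct.2).length : Nat) : Int)) :: tIdx t (a + (varsOf ct.2).length)

def Uinv (flat : List Src) (pats : List String) (i : Nat) (u : PySem.Set String) : Prop :=
  ∀ k, u.contains k = minLtB flat pats i k

def Rinv (flat : List Src) (pats : List String) (i : Nat) (u seen : PySem.Set String) : Prop :=
  ∀ k, u.contains k = (minLtB flat pats i k || (seen.contains k && eqWB flat pats i k))

-- small generic helpers ------------------------------------------------------
theorem beq_eq_decide_str (y x : String) : (y == x) = decide (y = x) := by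
  by_cases h : y = x <;> simp [h]

theorem set_contains_add (s : PySem.Set String) (x y : String) :
    (s.add x).contains y = (s.contains y || y == x) := by
  unfold PySem.Set.add
  by_cases h : s.contains x = true
  · have hx : x ∈ s := by simpa [List.contains_eq_mem] using h
    simp only [h, if_true]
    by_cases hyx : y = x
    · subst hyx
      simp [List.contains_eq_mem, hx]
    · simp [hyx, beq_eq_decide_str]
  · simp only [h, Bool.false_eq_true, if_false, List.contains_append]
    simp [List.contains_eq_mem, beq_eq_decide_str]

theorem setdefault_modify {ν : Type} (d : PySem.Dict String ν) (k : String) (v0 : ν) (f : ν → ν) :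
    (if d.get? k = none then d.insert k v0 else d).modify k v0 f = d.modify k v0 f := by
  by_cases h : d.get? k = none
  · rw [if_pos h]
    unfold PySem.Dict.modify
    rw [PySem.Dict.getD_insert_self, PySem.Dict.insert_insert_self,
      PySem.Dict.getD_of_get?_eq_none d v0 h]
  · rw [if_neg h]

theorem nested_fold_eq {σ : Type} (tcs : List (String × List String))
    (g : String → σ → String → σ) (st : σ) :
    tcs.foldl (fun st c => c.2.foldl (g c.1) st) st
      = (tlistOf tcs).foldl (fun st ct => g ct.1 st ct.2) st := by
  simp [tlistOf, List.foldl_flatMap, List.foldl_map]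

theorem flatten_inner (c1 : String) (l : List (String × String)) : ∀ init : List Src,
    l.foldl (fun fl2 nu => fl2 ++ [⟨c1, nu.1, nu.2, PySem.Str.lower nu.1, nu.1 ++ "_" ++ nu.2⟩]) init
      = init ++ l.map (fun nu => ⟨c1, nu.1, nu.2, PySem.Str.lower nu.1, nu.1 ++ "_" ++ nu.2⟩) := by
  induction l with
  | nil => simp
  | cons x t ih => intro init; simp [ih]

theorem flatten_gen (acs : List (String × List (String × String))) : ∀ init : List Src,
    acs.foldl (fun fl c =>
      c.2.foldl (fun fl2 nu => fl2 ++ [⟨c.1, nu.1, nu.2, PySem.Str.lower nu.1, nu.1 ++ "_" ++ nu.2⟩]) fl) init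
      = init ++ flatOf acs := by
  induction acs with
  | nil => intro init; simp [flatOf]
  | cons c t ih =>
    intro init
    simp only [List.foldl_cons]
    rw [flatten_inner, ih]
    rw [show flatOf (c :: t) = c.2.map (fun nu => (⟨c.1, nu.1, nu.2, PySem.Str.lower nu.1, nu.1 ++ "_" ++ nu.2⟩ : Src)) ++ flatOf t from by simp [flatOf]]
    rw [List.append_assoc]

theorem flatten_eq (acs : List (String × List (String × String))) : flatten acs = flatOf acs := by
  unfold flatten
  rw [flatten_gen acs []]
  exact List.nil_append _

theorem fm_lt_length {pats : List String} {norm : String} {m : Nat}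
    (h : fmOf pats norm = some m) : m < pats.length := by
  obtain ⟨hm, -, -⟩ := List.findIdx?_eq_some_iff_getElem.mp h
  exact hm

theorem fm_spec {pats : List String} {norm : String} {m : Nat}
    (h : fmOf pats norm = some m) :
    ∃ hm : m < pats.length, PySem.Str.isIn pats[m] norm = true ∧
      ∀ j (hj : j < m), ¬ PySem.Str.isIn pats[j] norm = true := by
  exact List.findIdx?_eq_some_iff_getElem.mp h

theorem fm_le_of_isIn {pats : List String} {norm : String} {i : Nat} {v : String}
    (hv : pats[i]? = some v) (h : PySem.Str.isIn v norm = true) :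
    ∃ m, m ≤ i ∧ fmOf pats norm = some m := by
  have hi : i < pats.length := (List.getElem?_eq_some_iff.mp hv).1
  have hveq : pats[i] = v := by
    have := (List.getElem?_eq_some_iff.mp hv).2; simpa using this
  cases hfm : fmOf pats norm with
  | none =>
    exfalso
    have hall := List.findIdx?_eq_none_iff.mp hfm
    have := hall pats[i] (List.getElem_mem hi)
    rw [hveq, h] at this
    simp at this
  | some m =>
    refine ⟨m, ?_, rfl⟩
    obtain ⟨hmlt, hpm, hbefore⟩ := List.findIdx?_eq_some_iff_getElem.mp hfm
    by_contra hgt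
    push_neg at hgt
    exact hbefore i hgt (by rw [hveq]; exact h)

theorem any_or_split {α : Type} (l : List α) (p q : α → Bool) :
    l.any (fun x => p x || q x) = (l.any p || l.any q) := by
  induction l with
  | nil => simp
  | cons x t ih => simp [ih, Bool.or_assoc, Bool.or_comm, Bool.or_left_comm]

theorem winAux_cons (flat : List Src) (pats : List String) (s : Src) (t : List Src) (seen : PySem.Set String) :
    winAux flat pats (s :: t) seen
      = if isWinB flat pats s && !seen.contains s.key then
          ((s :: (winAux flat pats t (seen.add s.key)).1), (winAux flat pats t (seen.add s.key)).2)
        else winAux flat pats t seen := rfl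

theorem winAux_seen (flat : List Src) (pats : List String) :
    ∀ (l : List Src) (seen : PySem.Set String) (k : String),
    (winAux flat pats l seen).2.contains k
      = (seen.contains k || l.any (fun s => isWinB flat pats s && s.key == k)) := by
  intro l
  induction l with
  | nil => intro seen k; simp [winAux]
  | cons s t ih =>
    intro seen k
    rw [winAux_cons]
    cases hwin : isWinB flat pats s with
    | true =>
      cases hseen : seen.contains s.key with
      | true =>
        rw [if_neg (by simp)]
        rw [ih]
        simp only [List.any_cons, hwin, Bool.true_and]
        by_cases hk : s.key = k
        · rw [← hk, hseen]; simp
        · have hbk : (s.key == k) = false := by simp [beq_eq_decide_str, hk]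
          simp [hbk]
      | false =>
        rw [if_pos (by simp)]
        rw [ih, set_contains_add]
        simp only [List.any_cons, hwin, Bool.true_and]
        by_cases hk : s.key = k
        · rw [← hk]
          simp [beq_eq_decide_str]
        · have hbk : (s.key == k) = false := by simp [beq_eq_decide_str, hk]
          have hkb : (k == s.key) = false := by
            rw [beq_eq_decide_str]
            simp only [decide_eq_false_iff_not]
            exact fun h => hk h.symm
          simp [hbk, hkb, Bool.or_assoc]
    | false =>
      rw [if_neg (by simp)]
      rw [ih]
      simp [List.any_cons, hwin]

theorem minLt_succ (flat : List Src) (pats : List String) (i : Nat) (k : String) :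
    minLtB flat pats (i+1) k = (minLtB flat pats i k || eqWB flat pats i k) := by
  unfold minLtB eqWB
  rw [← any_or_split]
  apply List.any_congr rfl
  intro s
  cases hfm : fmOf pats s.norm with
  | none => simp
  | some m =>
    by_cases hk : s.key = k
    · simp only [beq_eq_decide_str, hk, decide_true, Bool.true_and]
      by_cases h1 : m < i
      · have h2 : m < i + 1 := by omega
        simp [h1, h2]
      · by_cases h2 : m = i
        · subst h2; simp [h1]
        · have h3 : ¬ m < i + 1 := by omega
          simp [h1, h2, h3]
    · simp [beq_eq_decide_str, hk]

theorem Uinv_zero (flat : List Src) (pats : List String) : Uinv flat pats 0 [] := by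
  intro k
  rw [show PySem.Set.contains ([] : PySem.Set String) k = false from rfl]
  symm
  rw [minLtB, List.any_eq_false]
  intro s _
  cases hfm : fmOf pats s.norm <;> simp [hfm]

theorem Uinv_succ (flat : List Src) (pats : List String) (i : Nat) (u : PySem.Set String)
    (h : Rinv flat pats i u (winAux flat pats flat []).2) : Uinv flat pats (i+1) u := by
  intro k
  rw [h k, minLt_succ]
  by_cases hm : minLtB flat pats i k = true
  · simp [hm]
  · have hm' : minLtB flat pats i k = false := by simpa using hm
    rw [hm']
    simp only [Bool.false_or]
    cases he : eqWB flat pats i k with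
    | false => rw [Bool.and_false]
    | true =>
      rw [Bool.and_true]
      rw [winAux_seen]
      rw [show PySem.Set.contains ([] : PySem.Set String) k = false from rfl, Bool.false_or]
      obtain ⟨s, hs, hcond⟩ := List.any_eq_true.mp he
      rw [Bool.and_eq_true] at hcond
      obtain ⟨hkey, hfm⟩ := hcond
      have hkey' : s.key = k := by simpa [beq_eq_decide_str] using hkey
      have hfm' : fmOf pats s.norm = some i := by simpa using hfm
      apply List.any_eq_true.mpr
      refine ⟨s, hs, ?_⟩
      rw [Bool.and_eq_true]
      refine ⟨?_, hkey⟩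
      unfold isWinB
      rw [hfm']
      show (!minLtB flat pats i s.key) = true
      rw [hkey', hm']
      rfl

-- A-side: one scan of all sources with one pattern equals the winners at that pattern
theorem isWin_extract {flat : List Src} {pats : List String} {s : Src}
    (hwin : isWinB flat pats s = true) :
    ∃ ms, fmOf pats s.norm = some ms ∧ minLtB flat pats ms s.key = false := by
  unfold isWinB at hwin
  cases hfm : fmOf pats s.norm with
  | none => rw [hfm] at hwin; exact absurd hwin (by simp)
  | some ms =>
    rw [hfm] at hwin
    exact ⟨ms, rfl, by simpa using hwin⟩

theorem scanA_eq (flat : List Src) (pats : List String) (cat : String) (i : Nat) (v : String)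
    (hv : pats[i]? = some v) :
    ∀ (l : List Src), (∀ s ∈ l, s ∈ flat) →
    ∀ (u seen : PySem.Set String) (m : MD) (b : Bool), Rinv flat pats i u seen →
    (l.foldl (srcStepA cat v) ((m, u), b)).1.1
        = ((winAux flat pats l seen).1.filter (fun s => fmOf pats s.norm == some i)).foldl (emitC cat) m
    ∧ (l.foldl (srcStepA cat v) ((m, u), b)).2
        = (b || !((winAux flat pats l seen).1.filter (fun s => fmOf pats s.norm == some i)).isEmpty)
    ∧ Rinv flat pats i (l.foldl (srcStepA cat v) ((m, u), b)).1.2 (winAux flat pats l seen).2 := by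
  intro l
  induction l with
  | nil =>
    intro _ u seen m b hR
    exact ⟨rfl, by simp [winAux], hR⟩
  | cons s t ih =>
    intro hl u seen m b hR
    have hsf : s ∈ flat := hl s (by simp)
    have hlt : ∀ x ∈ t, x ∈ flat := fun x hx => hl x (by simp [hx])
    rw [List.foldl_cons, winAux_cons]
    by_cases hu : PySem.Set.contains u s.key = true
    · have hstep : srcStepA cat v ((m, u), b) s = ((m, u), b) := by
        unfold srcStepA; rw [if_pos hu]
      rw [hstep]
      by_cases hwin : isWinB flat pats s = true
      · by_cases hseen : PySem.Set.contains seen s.key = true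
        · rw [if_neg (by simp [hwin, show s.key ∈ seen from by simpa using hseen])]
          exact ih hlt u seen m b hR
        · have hseen' : PySem.Set.contains seen s.key = false := by simpa using hseen
          rw [if_pos (by simp [hwin, show s.key ∉ seen from by simpa using hseen'])]
          have hml : minLtB flat pats i s.key = true := by
            have h0 := hR s.key
            rw [hu, hseen'] at h0
            simpa using h0.symm
          obtain ⟨ms, hfm, hnl⟩ := isWin_extract hwin
          have hmsne : ms ≠ i := by
            intro he
            rw [he] at hnl
            rw [hnl] at hml
            exact absurd hml (by simp)
          have hfilter : (fmOf pats s.norm == some i) = false := by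
            rw [hfm]; simpa using hmsne
          have hR' : Rinv flat pats i u (seen.add s.key) := by
            intro k
            rw [hR k, set_contains_add]
            by_cases hkk : k = s.key
            · subst hkk
              rw [hml]
              simp
            · rw [show (k == s.key) = false from by simp [beq_eq_decide_str, hkk], Bool.or_false]
          obtain ⟨h1, h2, h3⟩ := ih hlt u (seen.add s.key) m b hR'
          have hfc : ((s :: (winAux flat pats t (seen.add s.key)).1).filter (fun s => fmOf pats s.norm == some i))
              = ((winAux flat pats t (seen.add s.key)).1.filter (fun s => fmOf pats s.norm == some i)) := by
            simp [List.filter_cons, hfilter]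
          exact ⟨by rw [hfc]; exact h1, by rw [hfc]; exact h2, h3⟩
      · rw [if_neg (by simp [show isWinB flat pats s = false from by simpa using hwin])]
        exact ih hlt u seen m b hR
    · have hu' : PySem.Set.contains u s.key = false := by simpa using hu
      have h0 := hR s.key
      rw [hu'] at h0
      obtain ⟨hmlF, hseF⟩ := Bool.or_eq_false_iff.mp h0.symm
      by_cases hmatch : PySem.Str.isIn v s.norm = true
      · have hfmi : fmOf pats s.norm = some i := by
          obtain ⟨ms, hle, hfm⟩ := fm_le_of_isIn hv hmatch
          rcases Nat.lt_or_ge ms i with hlt2 | hge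
          · exfalso
            have hml : minLtB flat pats i s.key = true := by
              rw [minLtB, List.any_eq_true]
              refine ⟨s, hsf, ?_⟩
              rw [Bool.and_eq_true]
              exact ⟨by simp [beq_eq_decide_str], by rw [hfm]; simpa using hlt2⟩
            rw [hml] at hmlF
            exact absurd hmlF (by simp)
          · have : ms = i := by omega
            rw [← this]; exact hfm
        have heqw : eqWB flat pats i s.key = true := by
          rw [eqWB, List.any_eq_true]
          refine ⟨s, hsf, ?_⟩
          rw [Bool.and_eq_true]
          exact ⟨by simp [beq_eq_decide_str], by rw [hfmi]; simp⟩
        have hseen' : PySem.Set.contains seen s.key = false := by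
          rw [heqw, Bool.and_true] at hseF
          exact hseF
        have hwin : isWinB flat pats s = true := by
          unfold isWinB
          rw [hfmi]
          show (!minLtB flat pats i s.key) = true
          rw [hmlF]
          rfl
        have hstep : srcStepA cat v ((m, u), b) s = ((emitC cat m s, u.add s.key), true) := by
          unfold srcStepA emitC
          rw [if_neg (by simp [show s.key ∉ u from by simpa using hu']), if_pos hmatch]
          have hfx : (fun md : PySem.Dict String (List (String × String)) =>
              (if md.get? s.name = none then md.insert s.name ([] : List (String × String)) else md).modify
                s.name [] (fun l => l ++ [(s.name, s.url)]))
              = (fun md : PySem.Dict String (List (String × String)) =>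
                  md.modify s.name [] (fun l => l ++ [(s.name, s.url)])) :=
            funext (fun md => setdefault_modify md s.name [] _)
          rw [hfx]
        rw [hstep, if_pos (by simp [hwin, show s.key ∉ seen from by simpa using hseen'])]
        have hfilter : (fmOf pats s.norm == some i) = true := by rw [hfmi]; simp
        have hR' : Rinv flat pats i (u.add s.key) (seen.add s.key) := by
          intro k
          rw [set_contains_add, hR k, set_contains_add]
          by_cases hkk : k = s.key
          · subst hkk
            rw [hmlF, heqw]
            simp
          · rw [show (k == s.key) = false from by simp [beq_eq_decide_str, hkk], Bool.or_false, Bool.or_false]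
        obtain ⟨h1, h2, h3⟩ := ih hlt (u.add s.key) (seen.add s.key) (emitC cat m s) true hR'
        have hfc : ((s :: (winAux flat pats t (seen.add s.key)).1).filter (fun s => fmOf pats s.norm == some i))
            = s :: ((winAux flat pats t (seen.add s.key)).1.filter (fun s => fmOf pats s.norm == some i)) := by
          simp [List.filter_cons, hfilter]
        refine ⟨?_, ?_, h3⟩
        · rw [hfc, List.foldl_cons]
          exact h1
        · rw [hfc]
          rw [h2]
          simp
      · have hmatch' : PySem.Str.isIn v s.norm = false := by simpa using hmatch
        have hstep : srcStepA cat v ((m, u), b) s = ((m, u), b) := by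
          unfold srcStepA
          rw [if_neg (by simp [show s.key ∉ u from by simpa using hu']), if_neg (by rw [hmatch']; simp)]
        rw [hstep]
        by_cases hwin : isWinB flat pats s = true
        · by_cases hseen : PySem.Set.contains seen s.key = true
          · rw [if_neg (by simp [hwin, show s.key ∈ seen from by simpa using hseen])]
            exact ih hlt u seen m b hR
          · have hseen' : PySem.Set.contains seen s.key = false := by simpa using hseen
            rw [if_pos (by simp [hwin, show s.key ∉ seen from by simpa using hseen'])]
            obtain ⟨ms, hfm, hnl⟩ := isWin_extract hwin
            have hfne : (fmOf pats s.norm == some i) = false := by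
              rw [hfm]
              have : ms ≠ i := by
                intro he
                subst he
                obtain ⟨hlt2, hp, -⟩ := fm_spec hfm
                have hveq : pats[ms] = v := by
                  have h2 := (List.getElem?_eq_some_iff.mp hv).2
                  simpa using h2
                rw [hveq, hmatch'] at hp
                exact absurd hp (by simp)
              simpa using this
            have heqwF : eqWB flat pats i s.key = false := by
              by_contra hc
              have heqw : eqWB flat pats i s.key = true := by simpa using hc
              obtain ⟨s', hs', hc2⟩ := List.any_eq_true.mp heqw
              rw [Bool.and_eq_true] at hc2
              obtain ⟨hk2, hfm2⟩ := hc2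
              have hk2' : s'.key = s.key := by simpa [beq_eq_decide_str] using hk2
              have hfm2' : fmOf pats s'.norm = some i := by simpa using hfm2
              -- ms > i is forced, contradicting minimality via s'
              have hmsi : ms ≠ i := by
                intro he
                rw [hfm, he] at hfne
                simp at hfne
              have hmsgt : i < ms := by
                rcases Nat.lt_or_ge i ms with h' | h'
                · exact h'
                · exfalso
                  have hms_lt : ms < i := by omega
                  have : minLtB flat pats i s.key = true := by
                    rw [minLtB, List.any_eq_true]
                    refine ⟨s, hsf, ?_⟩
                    rw [Bool.and_eq_true]
                    exact ⟨by simp [beq_eq_decide_str], by rw [hfm]; simpa using hms_lt⟩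
                  rw [this] at hmlF
                  exact absurd hmlF (by simp)
              have : minLtB flat pats ms s.key = true := by
                rw [minLtB, List.any_eq_true]
                refine ⟨s', hs', ?_⟩
                rw [Bool.and_eq_true]
                exact ⟨by simpa [beq_eq_decide_str] using hk2', by rw [hfm2']; simpa using hmsgt⟩
              rw [this] at hnl
              exact absurd hnl (by simp)
            have hR' : Rinv flat pats i u (seen.add s.key) := by
              intro k
              rw [hR k, set_contains_add]
              by_cases hkk : k = s.key
              · subst hkk
                rw [heqwF]
                simp
              · rw [show (k == s.key) = false from by simp [beq_eq_decide_str, hkk], Bool.or_false]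
            obtain ⟨h1, h2, h3⟩ := ih hlt u (seen.add s.key) m b hR'
            have hfc : ((s :: (winAux flat pats t (seen.add s.key)).1).filter (fun s => fmOf pats s.norm == some i))
                = ((winAux flat pats t (seen.add s.key)).1.filter (fun s => fmOf pats s.norm == some i)) := by
              simp [List.filter_cons, hfne]
            exact ⟨by rw [hfc]; exact h1, by rw [hfc]; exact h2, h3⟩
        · rw [if_neg (by simp [show isWinB flat pats s = false from by simpa using hwin])]
          exact ih hlt u seen m b hR

-- A-side: the variant loop of one template equals the event segment of its patterns
theorem Rinv_of_Uinv (flat : List Src) (pats : List String) (a : Nat) (u : PySem.Set String)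
    (hU : Uinv flat pats a u) : Rinv flat pats a u [] := by
  intro k
  rw [hU k, show PySem.Set.contains ([] : PySem.Set String) k = false from rfl]
  simp

theorem evSeg_zero (W : List Src) (pats : List String) (a : Nat) : evSeg W pats a 0 = [] := rfl

theorem not_isEmpty_append {α : Type} (x y : List α) :
    (!(x ++ y).isEmpty) = (!x.isEmpty || !y.isEmpty) := by
  cases x <;> simp

theorem evSeg_succ (W : List Src) (pats : List String) (a n : Nat) :
    evSeg W pats a (n+1)
      = W.filter (fun s => fmOf pats s.norm == some a) ++ evSeg W pats (a+1) n := rfl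

theorem prefix_tail_drop {v : String} {vt pats : List String} {a : Nat}
    (h : (v :: vt) <+: pats.drop a) : pats[a]? = some v ∧ vt <+: pats.drop (a+1) := by
  obtain ⟨r, hr⟩ := h
  constructor
  · have h0 : (pats.drop a)[0]? = some v := by rw [← hr]; rfl
    rw [List.getElem?_drop] at h0
    simpa using h0
  · refine ⟨r, ?_⟩
    have hdd : pats.drop (a + 1) = (pats.drop a).drop 1 := by
      simp [List.drop_drop, Nat.add_comm]
    rw [hdd, ← hr]
    rfl

theorem varLoopA_eq (flat : List Src) (pats : List String) (cat : String) :
    ∀ (vs : List String) (a : Nat), vs <+: pats.drop a →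
    ∀ (m : MD) (u : PySem.Set String) (b : Bool), Uinv flat pats a u →
    (vs.foldl (fun acc variant => flat.foldl (srcStepA cat variant) acc) ((m, u), b)).1.1
        = (evSeg (winnersOf flat pats) pats a vs.length).foldl (emitC cat) m
    ∧ (vs.foldl (fun acc variant => flat.foldl (srcStepA cat variant) acc) ((m, u), b)).2
        = (b || !(evSeg (winnersOf flat pats) pats a vs.length).isEmpty)
    ∧ Uinv flat pats (a + vs.length)
        (vs.foldl (fun acc variant => flat.foldl (srcStepA cat variant) acc) ((m, u), b)).1.2 := by
  intro vs
  induction vs with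
  | nil =>
    intro a _ m u b hU
    refine ⟨rfl, by simp [evSeg_zero], ?_⟩
    simpa using hU
  | cons v vt ih =>
    intro a hpre m u b hU
    obtain ⟨hv, hpre'⟩ := prefix_tail_drop hpre
    have hR : Rinv flat pats a u [] := Rinv_of_Uinv flat pats a u hU
    obtain ⟨h1, h2, h3⟩ := scanA_eq flat pats cat a v hv flat (fun s hs => hs) u [] m b hR
    have h1' : (flat.foldl (srcStepA cat v) ((m, u), b)).1.1
        = ((winnersOf flat pats).filter (fun s => fmOf pats s.norm == some a)).foldl (emitC cat) m := h1
    have h2' : (flat.foldl (srcStepA cat v) ((m, u), b)).2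
        = (b || !((winnersOf flat pats).filter (fun s => fmOf pats s.norm == some a)).isEmpty) := h2
    have hU' : Uinv flat pats (a+1) (flat.foldl (srcStepA cat v) ((m, u), b)).1.2 :=
      Uinv_succ flat pats a _ h3
    rw [List.foldl_cons]
    obtain ⟨e1, e2, e3⟩ := ih (a+1) hpre'
      (flat.foldl (srcStepA cat v) ((m, u), b)).1.1
      (flat.foldl (srcStepA cat v) ((m, u), b)).1.2
      (flat.foldl (srcStepA cat v) ((m, u), b)).2 hU'
    refine ⟨?_, ?_, ?_⟩
    · rw [List.length_cons, evSeg_succ, List.foldl_append, ← h1']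
      exact e1
    · rw [List.length_cons, evSeg_succ]
      refine e2.trans ?_
      rw [h2']
      simp [not_isEmpty_append, Bool.or_assoc]
    · rw [List.length_cons, show a + (vt.length + 1) = (a + 1) + vt.length from by omega]
      exact e3

-- A-side: the whole template loop equals the canonical fold
theorem mainA_eq (flat : List Src) (pats : List String) :
    ∀ (ts : List (String × String)) (a : Nat),
    (ts.flatMap (fun ct => varsOf ct.2)) <+: pats.drop a →
    ∀ (m : MD) (unt : UD) (u : PySem.Set String), Uinv flat pats a u →
    (ts.foldl (fun st ct => tmplStepA flat ct.1 st ct.2) (m, unt, u)).1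
        = (cfold (winnersOf flat pats) pats ts a (m, unt)).1
    ∧ (ts.foldl (fun st ct => tmplStepA flat ct.1 st ct.2) (m, unt, u)).2.1
        = (cfold (winnersOf flat pats) pats ts a (m, unt)).2
    ∧ Uinv flat pats (a + (ts.flatMap (fun ct => varsOf ct.2)).length)
        (ts.foldl (fun st ct => tmplStepA flat ct.1 st ct.2) (m, unt, u)).2.2 := by
  intro ts
  induction ts with
  | nil =>
    intro a _ m unt u hU
    exact ⟨rfl, rfl, by simpa using hU⟩
  | cons ct rest ih =>
    intro a hpre m unt u hU
    rw [List.flatMap_cons] at hpre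
    have hpre1 : varsOf ct.2 <+: pats.drop a := (List.prefix_append _ _).trans hpre
    have hpre2 : (rest.flatMap (fun ct => varsOf ct.2)) <+: pats.drop (a + (varsOf ct.2).length) := by
      obtain ⟨r, hr⟩ := hpre
      refine ⟨r, ?_⟩
      have hdd : pats.drop (a + (varsOf ct.2).length) = (pats.drop a).drop (varsOf ct.2).length := by
        simp [List.drop_drop, Nat.add_comm]
      rw [hdd, ← hr, List.append_assoc, List.drop_left]
    have hvl : ((((PySem.Str.split? ct.2 "|").getD []).filter (fun n => PySem.Str.strip n ≠ "")).map PySem.Str.strip).foldl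
          (fun acc variant => flat.foldl (srcStepA ct.1 (PySem.Str.lower variant)) acc) ((m, u), false)
        = (varsOf ct.2).foldl (fun acc v => flat.foldl (srcStepA ct.1 v) acc) ((m, u), false) := by
      rw [List.foldl_map]
      rw [show varsOf ct.2 = (((PySem.Str.split? ct.2 "|").getD []).filter (fun n => PySem.Str.strip n ≠ "")).map
          (fun n => PySem.Str.lower (PySem.Str.strip n)) from rfl]
      rw [List.foldl_map]
    obtain ⟨g1, g2, g3⟩ := varLoopA_eq flat pats ct.1 (varsOf ct.2) a hpre1 m u false hU
    have hts : tmplStepA flat ct.1 (m, unt, u) ct.2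
        = (((varsOf ct.2).foldl (fun acc v => flat.foldl (srcStepA ct.1 v) acc) ((m, u), false)).1.1,
           (if ((varsOf ct.2).foldl (fun acc v => flat.foldl (srcStepA ct.1 v) acc) ((m, u), false)).2 then unt
            else unt.modify ct.1 [] (fun l => l ++ [ct.2])),
           ((varsOf ct.2).foldl (fun acc v => flat.foldl (srcStepA ct.1 v) acc) ((m, u), false)).1.2) := by
      simp only [tmplStepA]
      rw [hvl]
    have htuple : (((varsOf ct.2).foldl (fun acc v => flat.foldl (srcStepA ct.1 v) acc) ((m, u), false)).1.1,
           (if ((varsOf ct.2).foldl (fun acc v => flat.foldl (srcStepA ct.1 v) acc) ((m, u), false)).2 then unt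
            else unt.modify ct.1 [] (fun l => l ++ [ct.2])),
           ((varsOf ct.2).foldl (fun acc v => flat.foldl (srcStepA ct.1 v) acc) ((m, u), false)).1.2)
        = ((evSeg (winnersOf flat pats) pats a (varsOf ct.2).length).foldl (emitC ct.1) m,
           (if (evSeg (winnersOf flat pats) pats a (varsOf ct.2).length).isEmpty
            then unt.modify ct.1 [] (fun l => l ++ [ct.2]) else unt),
           ((varsOf ct.2).foldl (fun acc v => flat.foldl (srcStepA ct.1 v) acc) ((m, u), false)).1.2) := by
      rw [g1, g2, Bool.false_or]
      cases (evSeg (winnersOf flat pats) pats a (varsOf ct.2).length).isEmpty <;> simp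
    rw [List.foldl_cons, hts, htuple]
    obtain ⟨e1, e2, e3⟩ := ih (a + (varsOf ct.2).length) hpre2
      ((evSeg (winnersOf flat pats) pats a (varsOf ct.2).length).foldl (emitC ct.1) m)
      (if (evSeg (winnersOf flat pats) pats a (varsOf ct.2).length).isEmpty
       then unt.modify ct.1 [] (fun l => l ++ [ct.2]) else unt)
      (((varsOf ct.2).foldl (fun acc v => flat.foldl (srcStepA ct.1 v) acc) ((m, u), false)).1.2) g3
    refine ⟨?_, ?_, ?_⟩
    · rw [show cfold (winnersOf flat pats) pats (ct :: rest) a (m, unt)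
          = cfold (winnersOf flat pats) pats rest (a + (varsOf ct.2).length)
              ((evSeg (winnersOf flat pats) pats a (varsOf ct.2).length).foldl (emitC ct.1) m,
               if (evSeg (winnersOf flat pats) pats a (varsOf ct.2).length).isEmpty
               then unt.modify ct.1 [] (fun l => l ++ [ct.2]) else unt) from rfl]
      exact e1
    · rw [show cfold (winnersOf flat pats) pats (ct :: rest) a (m, unt)
          = cfold (winnersOf flat pats) pats rest (a + (varsOf ct.2).length)
              ((evSeg (winnersOf flat pats) pats a (varsOf ct.2).length).foldl (emitC ct.1) m,
               if (evSeg (winnersOf flat pats) pats a (varsOf ct.2).length).isEmpty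
               then unt.modify ct.1 [] (fun l => l ++ [ct.2]) else unt) from rfl]
      exact e2
    · have hlen : a + ((varsOf ct.2 ++ rest.flatMap (fun ct => varsOf ct.2))).length
          = (a + (varsOf ct.2).length) + (rest.flatMap (fun ct => varsOf ct.2)).length := by
        simp [List.length_append]
        omega
      rw [List.flatMap_cons, hlen]
      exact e3

-- B-side ----------------------------------------------------------------------
theorem fmOf_cons (v : String) (vs : List String) (norm : String) :
    fmOf (v :: vs) norm
      = if PySem.Str.isIn v norm then some 0 else (fmOf vs norm).map (fun i => i + 1) := by
  unfold fmOf
  exact List.findIdx?_cons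

theorem firstMatch_eq (l : List String) (norm : String) :
    ∀ i : Int, firstMatchB l norm i = (fmOf l norm).map (fun p => i + (p : Int)) := by
  induction l with
  | nil => intro i; simp [firstMatchB, fmOf]
  | cons v vs ih =>
    intro i
    show (if PySem.Str.isIn v norm then some i else firstMatchB vs norm (i + 1))
      = (fmOf (v :: vs) norm).map (fun p => i + (p : Int))
    rw [fmOf_cons]
    by_cases hv : PySem.Str.isIn v norm = true
    · rw [if_pos hv, if_pos hv]
      simp
    · rw [if_neg hv, if_neg hv]
      rw [ih (i + 1)]
      cases hfm : fmOf vs norm with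
      | none => simp
      | some p =>
        simp [hfm]
        omega

theorem zip_fm (flat : List Src) (pats : List String) :
    flat.zip (flat.map (fun s => firstMatchB pats s.norm 0))
      = flat.map (fun s => (s, (fmOf pats s.norm).map (fun p : Nat => (p : Int)))) := by
  rw [show flat.zip (flat.map (fun s => firstMatchB pats s.norm 0))
      = (flat.map id).zip (flat.map (fun s => firstMatchB pats s.norm 0)) from by rw [List.map_id]]
  rw [List.zip_map']
  apply List.map_congr_left
  intro s _
  rw [id, firstMatch_eq]
  cases fmOf pats s.norm <;> simp

def ominStep (k : String) (acc : Option Int) (sf : Src × Option Int) : Option Int :=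
  if sf.1.key == k then
    (match acc, sf.2 with
     | none, o => o
     | some a, none => some a
     | some a, some f => some (min a f))
  else acc

theorem bestStep_get (d : PySem.Dict String Int) (sf : Src × Option Int) (k : String) :
    (bestStepB d sf).get? k = ominStep k (d.get? k) sf := by
  unfold bestStepB ominStep
  cases hf : sf.2 with
  | none =>
    dsimp only
    by_cases hk : sf.1.key = k
    · rw [if_pos (by simpa [beq_eq_decide_str])]
      cases d.get? k <;> rfl
    · rw [if_neg (by simpa [beq_eq_decide_str])]
  | some f =>
    dsimp only
    by_cases hk : sf.1.key = k
    · rw [if_pos (by simpa [beq_eq_decide_str])]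
      subst hk
      cases hd : d.get? sf.1.key with
      | none =>
        dsimp only
        rw [PySem.Dict.get?_insert_self]
      | some b =>
        dsimp only
        by_cases hfb : f < b
        · rw [if_pos hfb, PySem.Dict.get?_insert_self, min_eq_right (le_of_lt hfb)]
        · rw [if_neg hfb, hd, min_eq_left (by omega)]
    · rw [if_neg (by simpa [beq_eq_decide_str])]
      cases hd : d.get? sf.1.key with
      | none =>
        dsimp only
        exact PySem.Dict.get?_insert_of_ne d f (fun hh => hk hh.symm)
      | some b =>
        dsimp only
        by_cases hfb : f < b
        · rw [if_pos hfb]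
          exact PySem.Dict.get?_insert_of_ne d f (fun hh => hk hh.symm)
        · rw [if_neg hfb]

theorem best_master (l : List (Src × Option Int)) :
    ∀ (d : PySem.Dict String Int) (k : String),
    (l.foldl bestStepB d).get? k = l.foldl (ominStep k) (d.get? k) := by
  induction l with
  | nil => intro d k; simp
  | cons sf t ih =>
    intro d k
    rw [List.foldl_cons, List.foldl_cons, ih, bestStep_get]

theorem ominStep_none_iff (k : String) (acc : Option Int) (sf : Src × Option Int) :
    ominStep k acc sf = none ↔ (acc = none ∧ (sf.1.key = k → sf.2 = none)) := by
  unfold ominStep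
  by_cases hk : sf.1.key = k
  · rw [if_pos (by simpa [beq_eq_decide_str])]
    cases acc <;> cases hf : sf.2 <;> simp [hk]
  · rw [if_neg (by simpa [beq_eq_decide_str])]
    simp [hk]

theorem ominStep_eq_some (k : String) (acc : Option Int) (sf : Src × Option Int) (x : Int)
    (h : ominStep k acc sf = some x) : acc = some x ∨ (sf.1.key = k ∧ sf.2 = some x) := by
  unfold ominStep at h
  by_cases hk : sf.1.key = k
  · rw [if_pos (by simpa [beq_eq_decide_str])] at h
    cases ha : acc with
    | none =>
      cases hf : sf.2 with
      | none =>
        rw [ha, hf] at h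
        exact absurd (show (none : Option Int) = some x from h) (by simp)
      | some f =>
        rw [ha, hf] at h
        right
        exact ⟨hk, h⟩
    | some a =>
      cases hf : sf.2 with
      | none =>
        rw [ha, hf] at h
        left
        exact h
      | some f =>
        rw [ha, hf] at h
        have h' : min a f = x := Option.some_inj.mp h
        rcases le_total a f with hle | hle
        · left
          rw [← h', min_eq_left hle]
        · right
          exact ⟨hk, by rw [← h', min_eq_right hle]⟩
  · rw [if_neg (by simpa [beq_eq_decide_str])] at h
    left; exact h

theorem ominStep_some_of_acc (k : String) (acc : Option Int) (sf : Src × Option Int) (y : Int)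
    (ha : acc = some y) : ∃ z, ominStep k acc sf = some z ∧ z ≤ y := by
  unfold ominStep
  subst ha
  by_cases hk : sf.1.key = k
  · rw [if_pos (by simpa [beq_eq_decide_str])]
    cases hf : sf.2 with
    | none => exact ⟨y, rfl, le_refl y⟩
    | some f => exact ⟨min y f, rfl, min_le_left _ _⟩
  · rw [if_neg (by simpa [beq_eq_decide_str])]
    exact ⟨y, rfl, le_refl y⟩

theorem ominStep_some_of_val (k : String) (acc : Option Int) (sf : Src × Option Int) (f : Int)
    (hk : sf.1.key = k) (hf : sf.2 = some f) : ∃ z, ominStep k acc sf = some z ∧ z ≤ f := by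
  unfold ominStep
  rw [if_pos (by simpa [beq_eq_decide_str])]
  cases acc with
  | none => rw [hf]; exact ⟨f, rfl, le_refl f⟩
  | some a => rw [hf]; exact ⟨min a f, rfl, min_le_right _ _⟩

theorem omin_none (k : String) : ∀ (l : List (Src × Option Int)) (acc : Option Int),
    (l.foldl (ominStep k) acc = none ↔ acc = none ∧ ∀ sf ∈ l, sf.1.key = k → sf.2 = none) := by
  intro l
  induction l with
  | nil => intro acc; simp
  | cons sf t ih =>
    intro acc
    rw [List.foldl_cons, ih, ominStep_none_iff]
    simp only [List.forall_mem_cons]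
    tauto

theorem omin_low (k : String) : ∀ (l : List (Src × Option Int)) (acc : Option Int) (x : Int),
    l.foldl (ominStep k) acc = some x →
      (acc = some x ∨ ∃ sf ∈ l, sf.1.key = k ∧ sf.2 = some x) := by
  intro l
  induction l with
  | nil => intro acc x h; simp only [List.foldl_nil] at h; left; exact h
  | cons sf t ih =>
    intro acc x h
    rw [List.foldl_cons] at h
    rcases ih _ x h with hacc | ⟨sf', hsf', hk', hv'⟩
    · rcases ominStep_eq_some k acc sf x hacc with h1 | ⟨h1, h2⟩
      · left; exact h1
      · right; exact ⟨sf, List.mem_cons_self, h1, h2⟩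
    · right; exact ⟨sf', List.mem_cons_of_mem _ hsf', hk', hv'⟩

theorem omin_lb (k : String) : ∀ (l : List (Src × Option Int)) (acc : Option Int) (x : Int),
    l.foldl (ominStep k) acc = some x →
      (∀ y, acc = some y → x ≤ y) ∧
      (∀ sf ∈ l, sf.1.key = k → ∀ y, sf.2 = some y → x ≤ y) := by
  intro l
  induction l with
  | nil =>
    intro acc x h
    simp only [List.foldl_nil] at h
    refine ⟨fun y hy => ?_, by simp⟩
    rw [h] at hy
    simp only [Option.some_inj] at hy
    omega
  | cons sf t ih =>
    intro acc x h
    rw [List.foldl_cons] at h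
    obtain ⟨hacc, hrest⟩ := ih _ x h
    constructor
    · intro y hy
      obtain ⟨z, hz, hzy⟩ := ominStep_some_of_acc k acc sf y hy
      have := hacc z hz
      omega
    · intro sf' hsf' hk' y hy
      rcases List.mem_cons.mp hsf' with h1 | h1
      · subst h1
        obtain ⟨z, hz, hzy⟩ := ominStep_some_of_val k acc sf' y hk' hy
        have := hacc z hz
        omega
      · exact hrest sf' h1 hk' y hy

theorem best_none_iff (flat : List Src) (pats : List String) (k : String) :
    ((flat.map (fun s => (s, (fmOf pats s.norm).map (fun p : Nat => (p : Int))))).foldl bestStepB PySem.Dict.empty).get? k = none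
      ↔ ∀ s ∈ flat, s.key = k → fmOf pats s.norm = none := by
  rw [best_master, PySem.Dict.get?_empty, omin_none]
  constructor
  · rintro ⟨-, h⟩ s hs hk
    have := h (s, (fmOf pats s.norm).map (fun p : Nat => (p : Int))) (List.mem_map_of_mem hs) hk
    simpa using this
  · intro h
    refine ⟨rfl, ?_⟩
    intro sf hsf hk
    obtain ⟨s, hs, rfl⟩ := List.mem_map.mp hsf
    simp only []
    rw [h s hs hk]
    rfl

theorem best_some_iff (flat : List Src) (pats : List String) {s : Src} (hs : s ∈ flat) {m : Nat}
    (hm : fmOf pats s.norm = some m) :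
    (((flat.map (fun s => (s, (fmOf pats s.norm).map (fun p : Nat => (p : Int))))).foldl bestStepB PySem.Dict.empty).get? s.key = some (m : Int)
      ↔ minLtB flat pats m s.key = false) := by
  rw [best_master, PySem.Dict.get?_empty]
  constructor
  · intro h
    have hlb := (omin_lb s.key _ _ _ h).2
    rw [minLtB, List.any_eq_false]
    intro s' hs'
    simp only [Bool.not_eq_true]
    by_cases hk : s'.key = s.key
    · rw [show (s'.key == s.key) = true from by simpa [beq_eq_decide_str], Bool.true_and]
      cases hfm' : fmOf pats s'.norm with
      | none => rfl
      | some m' =>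
        simp only [decide_eq_false_iff_not, not_lt]
        have := hlb (s', (fmOf pats s'.norm).map (fun p : Nat => (p : Int)))
          (List.mem_map_of_mem hs') hk (m' : Int) (by rw [hfm']; rfl)
        exact_mod_cast this
    · rw [show (s'.key == s.key) = false from by simpa [beq_eq_decide_str], Bool.false_and]
  · intro hmin
    cases hres : (flat.map (fun s => (s, (fmOf pats s.norm).map (fun p : Nat => (p : Int))))).foldl (ominStep s.key) none with
    | none =>
      exfalso
      obtain ⟨-, hall⟩ := (omin_none s.key _ _).mp hres
      have := hall (s, (fmOf pats s.norm).map (fun p : Nat => (p : Int))) (List.mem_map_of_mem hs) rfl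
      simp only [hm] at this
      simp at this
    | some x =>
      have hlow := omin_low s.key _ _ _ hres
      rcases hlow with h | ⟨sf, hsf, hk, hv⟩
      · exact absurd h (by simp)
      · obtain ⟨s'', hs'', heq⟩ := List.mem_map.mp hsf
        rw [← heq] at hk hv
        simp only [] at hk hv
        cases hfm'' : fmOf pats s''.norm with
        | none => rw [hfm''] at hv; exact absurd hv (by simp)
        | some m'' =>
          rw [hfm''] at hv
          simp only [Option.map_some, Option.some_inj] at hv
          have hub := (omin_lb s.key _ _ _ hres).2 (s, (fmOf pats s.norm).map (fun p : Nat => (p : Int)))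
            (List.mem_map_of_mem hs) rfl (m : Int) (by rw [hm]; rfl)
          have hmle : m'' ≤ m := by
            have : x ≤ (m : Int) := hub
            rw [← hv] at this
            exact_mod_cast this
          have hge : ¬ m'' < m := by
            intro hlt
            have hcontra : minLtB flat pats m s.key = true := by
              rw [minLtB, List.any_eq_true]
              refine ⟨s'', hs'', ?_⟩
              rw [Bool.and_eq_true]
              refine ⟨by simpa [beq_eq_decide_str] using hk, ?_⟩
              rw [hfm'']
              simpa using hlt
            rw [hmin] at hcontra
            exact absurd hcontra (by simp)
          have hmm : m'' = m := by omega
          rw [← hv, hmm]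
  -- B-side: the bucket dictionary holds exactly the winners of each pattern
theorem buckets_eq (flat : List Src) (pats : List String)
    (best : PySem.Dict String Int)
    (hbs : ∀ s ∈ flat, ∀ m : Nat, fmOf pats s.norm = some m →
      (best.get? s.key = some (m : Int) ↔ minLtB flat pats m s.key = false)) :
    ∀ (l : List Src), (∀ s ∈ l, s ∈ flat) →
    ∀ (bkd : PySem.Dict Int (List Src)) (seen : PySem.Set String) (jN : Nat),
    ((l.map (fun s => (s, (fmOf pats s.norm).map (fun p : Nat => (p : Int))))).foldl (bkStepB best) (bkd, seen)).1.getD (jN : Int) []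
        = bkd.getD (jN : Int) [] ++ ((winAux flat pats l seen).1.filter (fun s => fmOf pats s.norm == some jN))
    ∧ ((l.map (fun s => (s, (fmOf pats s.norm).map (fun p : Nat => (p : Int))))).foldl (bkStepB best) (bkd, seen)).2
        = (winAux flat pats l seen).2 := by
  intro l
  induction l with
  | nil =>
    intro _ bkd seen jN
    exact ⟨by simp [winAux], by simp [winAux]⟩
  | cons s t ih =>
    intro hl bkd seen jN
    have hsf : s ∈ flat := hl s (by simp)
    have hlt : ∀ x ∈ t, x ∈ flat := fun x hx => hl x (by simp [hx])
    rw [List.map_cons, List.foldl_cons, winAux_cons]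
    cases hfm : fmOf pats s.norm with
    | none =>
      have hstep : bkStepB best (bkd, seen) (s, Option.map (fun p : Nat => (p : Int)) none) = (bkd, seen) := rfl
      rw [hstep, if_neg (by simp [isWinB, hfm])]
      exact ih hlt bkd seen jN
    | some mfm =>
      by_cases hwin : isWinB flat pats s = true
      · have hminF : minLtB flat pats mfm s.key = false := by
          obtain ⟨ms, hfm2, hnl⟩ := isWin_extract hwin
          rw [hfm] at hfm2
          injection hfm2 with hmm
          rw [hmm]
          exact hnl
        have hbest : best.get? s.key = some ((mfm : Nat) : Int) := (hbs s hsf mfm hfm).mpr hminF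
        by_cases hseen : PySem.Set.contains seen s.key = true
        · have hstep : bkStepB best (bkd, seen) (s, Option.map (fun p : Nat => (p : Int)) (some mfm)) = (bkd, seen) := by
            unfold bkStepB
            rw [Option.map_some]
            dsimp only
            rw [if_neg (by simp [show s.key ∈ seen from by simpa using hseen])]
          rw [hstep, if_neg (by simp [hwin, show s.key ∈ seen from by simpa using hseen])]
          exact ih hlt bkd seen jN
        · have hseen' : PySem.Set.contains seen s.key = false := by simpa using hseen
          have hstep : bkStepB best (bkd, seen) (s, Option.map (fun p : Nat => (p : Int)) (some mfm))
              = (bkd.modify ((mfm : Nat) : Int) [] (fun l => l ++ [s]), seen.add s.key) := by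
            unfold bkStepB
            rw [Option.map_some]
            dsimp only
            rw [if_pos (by simp [hbest, show s.key ∉ seen from by simpa using hseen'])]
          rw [hstep, if_pos (by simp [hwin, show s.key ∉ seen from by simpa using hseen'])]
          obtain ⟨ih1, ih2⟩ := ih hlt (bkd.modify ((mfm : Nat) : Int) [] (fun l => l ++ [s])) (seen.add s.key) jN
          refine ⟨?_, ih2⟩
          rw [ih1, PySem.Dict.getD_modify]
          by_cases hj : jN = mfm
          · subst hj
            rw [if_pos rfl]
            rw [show ((s :: (winAux flat pats t (seen.add s.key)).1).filter (fun s => fmOf pats s.norm == some jN))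
                = s :: ((winAux flat pats t (seen.add s.key)).1.filter (fun s => fmOf pats s.norm == some jN)) from by
              simp [List.filter_cons, hfm]]
            simp [List.append_assoc]
          · have hne : (fmOf pats s.norm == some jN) = false := by
              rw [hfm]
              simp only [beq_eq_false_iff_ne, ne_eq, Option.some_inj]
              omega
            rw [if_neg (by simpa using hj)]
            rw [show ((s :: (winAux flat pats t (seen.add s.key)).1).filter (fun s => fmOf pats s.norm == some jN))
                = ((winAux flat pats t (seen.add s.key)).1.filter (fun s => fmOf pats s.norm == some jN)) from by
              simp [List.filter_cons, hne]]
      · have hminT : minLtB flat pats mfm s.key = true := by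
          unfold isWinB at hwin
          rw [hfm] at hwin
          simpa using hwin
        have hbne : (best.get? s.key == some ((mfm : Nat) : Int)) = false := by
          by_cases hb : best.get? s.key = some ((mfm : Nat) : Int)
          · exfalso
            have hcc := (hbs s hsf mfm hfm).mp hb
            rw [hminT] at hcc
            exact absurd hcc (by simp)
          · simp [hb]
        have hstep : bkStepB best (bkd, seen) (s, Option.map (fun p : Nat => (p : Int)) (some mfm)) = (bkd, seen) := by
          unfold bkStepB
          rw [Option.map_some]
          dsimp only
          rw [if_neg (by simp [hbne])]
        rw [hstep, if_neg (by simp [show isWinB flat pats s = false from by simpa using hwin])]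
        exact ih hlt bkd seen jN

theorem inner_fold_emit (cat : String) :
    ∀ (l : List Src) (m : MD) (b : Bool),
    l.foldl (fun a3 s => (emitC cat a3.1 s, true)) (m, b) = (l.foldl (emitC cat) m, b || !l.isEmpty) := by
  intro l
  induction l with
  | nil => intro m b; simp
  | cons s t ih => intro m b; simp [ih]

-- B-side: the reassembly loop equals the canonical fold
theorem evSeg_snoc (W : List Src) (pats : List String) : ∀ (n a : Nat),
    evSeg W pats a (n+1) = evSeg W pats a n ++ W.filter (fun s => fmOf pats s.norm == some (a + n)) := by
  intro n
  induction n with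
  | zero => intro a; simp [evSeg_succ, evSeg_zero]
  | succ n ih =>
    intro a
    rw [evSeg_succ, ih (a+1), evSeg_succ, List.append_assoc]
    have hjj : (a + 1) + n = a + (n + 1) := by omega
    rw [hjj]

theorem rangeFoldB (cat : String) (W : List Src) (pats : List String)
    (buckets : PySem.Dict Int (List Src))
    (hb : ∀ jN : Nat, buckets.getD ((jN : Nat) : Int) [] = W.filter (fun s => fmOf pats s.norm == some jN)) :
    ∀ (n a : Nat) (m : MD) (b : Bool),
    (PySem.List.pyRange (a : Int) (((a + n : Nat)) : Int) 1).foldl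
        (fun acc2 p => (buckets.getD p []).foldl (fun acc3 s => (emitC cat acc3.1 s, true)) acc2) (m, b)
      = ((evSeg W pats a n).foldl (emitC cat) m, b || !(evSeg W pats a n).isEmpty) := by
  intro n
  induction n with
  | zero =>
    intro a m b
    rw [show (((a + 0 : Nat)) : Int) = (a : Int) from by push_cast; ring]
    rw [PySem.List.pyRange_one_eq_nil (le_refl _)]
    simp [evSeg_zero]
  | succ n ih =>
    intro a m b
    have h1 : (((a + (n+1) : Nat)) : Int) = (((a + n : Nat)) : Int) + 1 := by push_cast; ring
    rw [h1, PySem.List.pyRange_one_succ_right (by push_cast; omega)]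
    rw [List.foldl_append, ih a m b, List.foldl_cons, List.foldl_nil, hb (a + n), inner_fold_emit, evSeg_snoc]
    refine Prod.ext ?_ ?_
    · dsimp only
      rw [List.foldl_append]
    · dsimp only
      rw [not_isEmpty_append, ← Bool.or_assoc]

theorem mainB_eq (W : List Src) (pats : List String) (buckets : PySem.Dict Int (List Src))
    (hb : ∀ jN : Nat, buckets.getD ((jN : Nat) : Int) [] = W.filter (fun s => fmOf pats s.norm == some jN)) :
    ∀ (ts : List (String × String)) (a : Nat) (m : MD) (unt : UD),
    (tIdx ts a).foldl (tmplStepB buckets) (m, unt) = cfold W pats ts a (m, unt) := by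
  intro ts
  induction ts with
  | nil => intro a m unt; rfl
  | cons ct rest ih =>
    intro a m unt
    rw [show tIdx (ct :: rest) a
        = (ct.1, ct.2, (a : Int), (((a + (varsOf ct.2).length : Nat)) : Int)) :: tIdx rest (a + (varsOf ct.2).length) from rfl]
    rw [List.foldl_cons]
    have hstep : tmplStepB buckets (m, unt) (ct.1, ct.2, (a : Int), (((a + (varsOf ct.2).length : Nat)) : Int))
        = ((evSeg W pats a (varsOf ct.2).length).foldl (emitC ct.1) m,
           if (evSeg W pats a (varsOf ct.2).length).isEmpty then unt.modify ct.1 [] (fun l => l ++ [ct.2]) else unt) := by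
      unfold tmplStepB
      dsimp only
      rw [show (fun (acc3 : MD × Bool) (s : Src) =>
            (acc3.1.modify ct.1 PySem.Dict.empty (fun md => md.modify s.name [] (fun l => l ++ [(s.name, s.url)])), true))
          = (fun (acc3 : MD × Bool) (s : Src) => (emitC ct.1 acc3.1 s, true)) from rfl]
      rw [rangeFoldB ct.1 W pats buckets hb (varsOf ct.2).length a m false]
      rw [Bool.false_or]
      cases (evSeg W pats a (varsOf ct.2).length).isEmpty <;> simp
    rw [hstep]
    rw [show cfold W pats (ct :: rest) a (m, unt)
        = cfold W pats rest (a + (varsOf ct.2).length)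
            ((evSeg W pats a (varsOf ct.2).length).foldl (emitC ct.1) m,
             if (evSeg W pats a (varsOf ct.2).length).isEmpty then unt.modify ct.1 [] (fun l => l ++ [ct.2]) else unt) from rfl]
    exact ih (a + (varsOf ct.2).length) _ _

-- B-side: construction of the pattern list and template index
theorem patseg (parts : List String) : ∀ ps0 : List String,
    parts.foldl (fun ps part =>
        if PySem.Str.strip part ≠ "" then ps ++ [PySem.Str.lower (PySem.Str.strip part)] else ps) ps0
      = ps0 ++ (parts.filter (fun n => PySem.Str.strip n ≠ "")).map (fun n => PySem.Str.lower (PySem.Str.strip n)) := by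
  induction parts with
  | nil => intro ps0; simp
  | cons p t ih =>
    intro ps0
    simp only [List.foldl_cons]
    by_cases h : PySem.Str.strip p ≠ ""
    · rw [if_pos h, ih]
      simp [List.filter_cons, h]
    · rw [if_neg h, ih]
      simp [List.filter_cons, h]

theorem pt_flat : ∀ (ts : List (String × String)) (ps0 : List String) (tx0 : List (String × String × Int × Int)),
    ts.foldl (fun pt ct =>
        ((((PySem.Str.split? ct.2 "|").getD []).foldl (fun ps part =>
            if PySem.Str.strip part ≠ "" then ps ++ [PySem.Str.lower (PySem.Str.strip part)] else ps) pt.1),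
         pt.2 ++ [(ct.1, ct.2, (pt.1.length : Int),
           ((((PySem.Str.split? ct.2 "|").getD []).foldl (fun ps part =>
            if PySem.Str.strip part ≠ "" then ps ++ [PySem.Str.lower (PySem.Str.strip part)] else ps) pt.1).length : Int))]))
      (ps0, tx0)
      = (ps0 ++ ts.flatMap (fun ct => varsOf ct.2), tx0 ++ tIdx ts ps0.length) := by
  intro ts
  induction ts with
  | nil => intro ps0 tx0; simp [tIdx]
  | cons ct rest ih =>
    intro ps0 tx0
    simp only [List.foldl_cons]
    rw [patseg, ih]
    have hv : (((PySem.Str.split? ct.2 "|").getD []).filter (fun n => PySem.Str.strip n ≠ "")).map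
        (fun n => PySem.Str.lower (PySem.Str.strip n)) = varsOf ct.2 := rfl
    rw [hv]
    simp only [tIdx, List.flatMap_cons]
    simp only [Prod.mk.injEq]
    constructor
    · rw [List.append_assoc]
    · simp [List.length_append, List.append_assoc]


theorem minLt_top (flat : List Src) (pats : List String) (k : String) :
    minLtB flat pats pats.length k = true ↔ ∃ s ∈ flat, s.key = k ∧ fmOf pats s.norm ≠ none := by
  rw [minLtB, List.any_eq_true]
  constructor
  · rintro ⟨s, hs, hc⟩
    rw [Bool.and_eq_true] at hc
    obtain ⟨h1, h2⟩ := hc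
    refine ⟨s, hs, by simpa [beq_eq_decide_str] using h1, ?_⟩
    cases hfm : fmOf pats s.norm with
    | none => rw [hfm] at h2; exact absurd h2 (by simp)
    | some m => simp [hfm]
  · rintro ⟨s, hs, hk, hfm⟩
    refine ⟨s, hs, ?_⟩
    rw [Bool.and_eq_true]
    refine ⟨by simp [beq_eq_decide_str, hk], ?_⟩
    cases hfm2 : fmOf pats s.norm with
    | none => exact absurd hfm2 hfm
    | some m =>
      simpa using fm_lt_length hfm2

theorem usA_eq_usB (flat : List Src) (pats : List String) (used : PySem.Set String)
    (hU : Uinv flat pats pats.length used) :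
    flat.foldl (usStepA used) PySem.Dict.empty
      = flat.foldl (fun (d : PySem.Dict String (List (String × String))) s =>
          if ((flat.map (fun s => (s, (fmOf pats s.norm).map (fun p : Nat => (p : Int))))).foldl bestStepB PySem.Dict.empty).get? s.key = none
          then d.modify s.cat [] (fun l => l ++ [(s.name, s.url)]) else d) PySem.Dict.empty := by
  apply PySem.List.foldl_congr_mem
  intro d s hs
  unfold usStepA
  by_cases hused : PySem.Set.contains used s.key = true
  · rw [if_pos hused]
    have hne : ¬ ((flat.map (fun s => (s, (fmOf pats s.norm).map (fun p : Nat => (p : Int))))).foldl bestStepB PySem.Dict.empty).get? s.key = none := by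
      intro hnone
      have hall := (best_none_iff flat pats s.key).mp hnone
      have hml := hU s.key
      rw [hused] at hml
      obtain ⟨s', hs', hk', hfm'⟩ := (minLt_top flat pats s.key).mp hml.symm
      exact hfm' (hall s' hs' hk')
    rw [if_neg hne]
  · have hused' : PySem.Set.contains used s.key = false := by simpa using hused
    have hnone : ((flat.map (fun s => (s, (fmOf pats s.norm).map (fun p : Nat => (p : Int))))).foldl bestStepB PySem.Dict.empty).get? s.key = none := by
      apply (best_none_iff flat pats s.key).mpr
      intro s' hs' hk'
      by_contra hne
      have hml : minLtB flat pats pats.length s.key = true := (minLt_top flat pats s.key).mpr ⟨s', hs', hk', hne⟩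
      have hcc := hU s.key
      rw [hused', hml] at hcc
      exact absurd hcc (by simp)
    rw [if_neg (by rw [hused']; simp), if_pos hnone]
    exact setdefault_modify d s.cat [] _

theorem match_channels_spec : Claim_equal_match_channels := by
  intro tcs acs _
  show match_channels tcs acs = match_channels_alt tcs acs
  simp only [match_channels, match_channels_alt]
  rw [flatten_eq]
  rw [nested_fold_eq tcs (fun cat => tmplStepA (flatOf acs) cat)]
  rw [nested_fold_eq tcs (fun cat pt tmpl =>
      ((((PySem.Str.split? tmpl "|").getD []).foldl (fun ps part =>
          if PySem.Str.strip part ≠ "" then ps ++ [PySem.Str.lower (PySem.Str.strip part)] else ps) pt.1),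
       pt.2 ++ [(cat, tmpl, (pt.1.length : Int),
         ((((PySem.Str.split? tmpl "|").getD []).foldl (fun ps part =>
          if PySem.Str.strip part ≠ "" then ps ++ [PySem.Str.lower (PySem.Str.strip part)] else ps) pt.1).length : Int))]))]
  rw [pt_flat (tlistOf tcs) [] []]
  simp only [List.nil_append, List.length_nil]
  rw [show (tlistOf tcs).flatMap (fun ct => varsOf ct.2) = patsOf tcs from rfl]
  simp only [zip_fm (flatOf acs) (patsOf tcs)]
  have hbs := fun (s : Src) (hs : s ∈ flatOf acs) (mm : Nat) (hm : fmOf (patsOf tcs) s.norm = some mm) =>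
    best_some_iff (flatOf acs) (patsOf tcs) hs hm
  have hbuck : ∀ jN : Nat,
      (((flatOf acs).map (fun s => (s, (fmOf (patsOf tcs) s.norm).map (fun p : Nat => (p : Int))))).foldl (bkStepB (((flatOf acs).map (fun s => (s, (fmOf (patsOf tcs) s.norm).map (fun p : Nat => (p : Int))))).foldl bestStepB PySem.Dict.empty)) (PySem.Dict.empty, ([] : PySem.Set String))).1.getD ((jN : Nat) : Int) []
        = (winnersOf (flatOf acs) (patsOf tcs)).filter (fun s => fmOf (patsOf tcs) s.norm == some jN) := by
    intro jN
    have h := (buckets_eq (flatOf acs) (patsOf tcs) _ hbs (flatOf acs) (fun s hs => hs)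
      PySem.Dict.empty [] jN).1
    rw [h]
    rw [show (PySem.Dict.empty : PySem.Dict Int (List Src)).getD ((jN : Nat) : Int) [] = [] from by
      rw [PySem.Dict.getD_eq_get?_getD, PySem.Dict.get?_empty]; rfl]
    rw [List.nil_append]
    rfl
  have hB := mainB_eq (winnersOf (flatOf acs) (patsOf tcs)) (patsOf tcs) _ hbuck (tlistOf tcs) 0
      (tcs.foldl (fun m c => m.insert c.1 PySem.Dict.empty) PySem.Dict.empty)
      (tcs.foldl (fun m c => m.insert c.1 ([] : List String)) PySem.Dict.empty)
  obtain ⟨hA1, hA2, hA3⟩ := mainA_eq (flatOf acs) (patsOf tcs) (tlistOf tcs) 0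
      (by rw [List.drop_zero]; exact List.prefix_refl _)
      (tcs.foldl (fun m c => m.insert c.1 PySem.Dict.empty) PySem.Dict.empty)
      (tcs.foldl (fun m c => m.insert c.1 ([] : List String)) PySem.Dict.empty)
      ([] : PySem.Set String) (Uinv_zero _ _)
  have hA3' : Uinv (flatOf acs) (patsOf tcs) (patsOf tcs).length
      (((tlistOf tcs).foldl (fun st ct => tmplStepA (flatOf acs) ct.1 st ct.2)
        ((tcs.foldl (fun m c => m.insert c.1 PySem.Dict.empty) PySem.Dict.empty),
         (tcs.foldl (fun m c => m.insert c.1 ([] : List String)) PySem.Dict.empty),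
         ([] : PySem.Set String))).2.2) := by
    have h := hA3
    rw [Nat.zero_add] at h
    exact h
  rw [hA1, hA2, hB]
  simp only [Prod.mk.injEq]
  refine ⟨by trivial, by trivial, ?_⟩
  exact congrArg PySem.Dict.items (usA_eq_usB (flatOf acs) (patsOf tcs) _ hA3')
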